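-- pv_equiv track=rewrite | github.com/drajkata/goithomeworks | Projects/AddressBook/address_book/main.py | clossest_match
-- ===== SOURCE A (Python) =====
-- def clossest_match(querry: str, commands):
--     """filters commands if they start with querry,
--     if no command found querry is shortened by one char from the end
--     and function tries again (recursively)"""
--     if len(querry) == 0:
--         return []
--     matched_commands = list(filter(lambda x: x.startswith(querry), commands))
--     if len(matched_commands) > 0:
--         return matched_commands
--     else:
--         return clossest_match(querry[:-1], commands)
-- ===== SOURCE B (Python) =====
-- def clossest_match(querry: str, commands):
--     """Non-recursive re-implementation: one pass computes, for each command, the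
--     length of its longest common prefix with querry; the commands achieving the
--     maximal (positive) such length are exactly the matches."""
--     def cpl(c):
--         n = 0
--         for a, b in zip(querry, c):
--             if a != b:
--                 break
--             n += 1
--         return n
--     best = 0
--     for c in commands:
--         best = max(best, cpl(c))
--     if best == 0:
--         return []
--     return [c for c in commands if cpl(c) >= best]
-- ===== Notes on version B (the rewrite author's own statement) =====
-- stated objective: faster
-- what changed: A retries the startswith filter recursively with ever-shorter query prefixes (up to L passes over the commands); B makes one pass computing each command's longest-common-prefix length with the query, takes the maximum, and filters once by that length.
import Mathlib
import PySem

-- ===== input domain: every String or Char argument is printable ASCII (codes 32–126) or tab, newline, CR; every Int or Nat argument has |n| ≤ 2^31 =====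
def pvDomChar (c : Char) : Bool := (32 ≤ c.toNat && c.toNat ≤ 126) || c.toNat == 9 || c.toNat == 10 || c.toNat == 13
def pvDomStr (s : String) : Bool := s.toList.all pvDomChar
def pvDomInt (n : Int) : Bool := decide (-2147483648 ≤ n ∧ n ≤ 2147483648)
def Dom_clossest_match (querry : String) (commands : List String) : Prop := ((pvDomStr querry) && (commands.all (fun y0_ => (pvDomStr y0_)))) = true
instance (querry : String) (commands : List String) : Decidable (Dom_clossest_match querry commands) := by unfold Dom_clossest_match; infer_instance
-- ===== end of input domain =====

-- B replaces A's recursive prefix-shortening by a single pass computing each command's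
-- longest-common-prefix length with the query (objective: faster, no repeated rescans).

-- ===== PORT A =====
def clossest_match (querry : String) (commands : List String) : List String :=
  if PySem.Str.len querry = 0 then []
  else
    let matched_commands := commands.filter (fun x => PySem.Str.startswith x querry)
    if 0 < matched_commands.length then matched_commands
    else clossest_match (PySem.Str.slice querry none (some (-1))) commands
termination_by querry.toList.length
decreasing_by
  rw [PySem.Str.slice_to_neg_one, List.length_dropLast]
  have := PySem.Str.len_eq querry
  omega

-- ===== PORT B =====
-- length of the longest common prefix (B's inner `cpl` loop over zip(querry, c))
def pvCpl : List Char → List Char → Nat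
  | a :: q, b :: c => if a = b then pvCpl q c + 1 else 0
  | _, _ => 0

def clossest_match_alt (querry : String) (commands : List String) : List String :=
  let best := commands.foldl (fun m c => max m (pvCpl querry.toList c.toList)) 0
  if best = 0 then []
  else commands.filter (fun c => decide (best ≤ pvCpl querry.toList c.toList))

-- ===== PRECONDITION & SPEC =====
def Spec_clossest_match (querry : String) (commands : List String) (out : List String) : Prop := out = clossest_match_alt querry commands
instance (querry : String) (commands : List String) (out : List String) : Decidable (Spec_clossest_match querry commands out) := by unfold Spec_clossest_match; infer_instance

-- ===== CLAIM (what is proved, stated in full; the proofs are below) =====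
def Claim_equal_clossest_match : Prop := ∀ (querry : String) (commands : List String), Dom_clossest_match querry commands → Spec_clossest_match querry commands (clossest_match querry commands)

-- ===== LEMMAS AND PROOFS =====

theorem pvCpl_le_left (q c : List Char) : pvCpl q c ≤ q.length := by
  induction q generalizing c with
  | nil => simp [pvCpl]
  | cons a q ih =>
    cases c with
    | nil => simp [pvCpl]
    | cons b c =>
      simp only [pvCpl, List.length_cons]
      split
      · exact Nat.succ_le_succ (ih c)
      · omega

theorem prefix_iff_cpl (q c : List Char) : q <+: c ↔ q.length ≤ pvCpl q c := by
  induction q generalizing c with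
  | nil => simp [pvCpl]
  | cons a q ih =>
    cases c with
    | nil => simp [pvCpl]
    | cons b c =>
      simp only [pvCpl, List.cons_prefix_cons, List.length_cons]
      constructor
      · rintro ⟨rfl, h⟩
        rw [if_pos rfl]
        exact Nat.succ_le_succ ((ih c).1 h)
      · intro h
        by_cases hab : a = b
        · subst hab
          rw [if_pos rfl] at h
          exact ⟨rfl, (ih c).2 (Nat.le_of_succ_le_succ h)⟩
        · rw [if_neg hab] at h
          omega

theorem pvCpl_take (q c : List Char) (m : Nat) : pvCpl (q.take m) c = min m (pvCpl q c) := by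
  induction q generalizing c m with
  | nil => simp [pvCpl]
  | cons a q ih =>
    cases m with
    | zero => simp [pvCpl]
    | succ m =>
      cases c with
      | nil => simp [pvCpl]
      | cons b c =>
        simp only [List.take_succ_cons, pvCpl]
        split
        · rw [ih]; omega
        · simp

theorem foldl_max_le {f : String → Nat} {B a : Nat} {l : List String}
    (ha : a ≤ B) (hf : ∀ c ∈ l, f c ≤ B) :
    List.foldl (fun m c => max m (f c)) a l ≤ B := by
  induction l generalizing a with
  | nil => exact ha
  | cons x l ih =>
    exact ih (Nat.max_le.2 ⟨ha, hf x (by simp)⟩) (fun c hc => hf c (by simp [hc]))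

theorem le_foldl_max {f : String → Nat} {a : Nat} {l : List String} :
    a ≤ List.foldl (fun m c => max m (f c)) a l := by
  induction l generalizing a with
  | nil => exact Nat.le_refl a
  | cons x l ih => exact le_trans (Nat.le_max_left a (f x)) ih

theorem mem_le_foldl_max {f : String → Nat} {a : Nat} {l : List String} {c : String}
    (hc : c ∈ l) : f c ≤ List.foldl (fun m c => max m (f c)) a l := by
  induction l generalizing a with
  | nil => cases hc
  | cons x l ih =>
    rcases List.mem_cons.1 hc with rfl | hc
    · exact le_trans (Nat.le_max_right a (f c)) le_foldl_max
    · exact ih hc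

theorem foldl_max_congr {f g : String → Nat} {a : Nat} {l : List String}
    (h : ∀ c ∈ l, f c = g c) :
    List.foldl (fun m c => max m (f c)) a l = List.foldl (fun m c => max m (g c)) a l := by
  induction l generalizing a with
  | nil => rfl
  | cons x l ih =>
    simp only [List.foldl_cons, h x (by simp)]
    exact ih (fun c hc => h c (by simp [hc]))

-- B's result, phrased on the query's character list (what clossest_match_alt computes)
def altCore (q : List Char) (cmds : List String) : List String :=
  if cmds.foldl (fun m c => max m (pvCpl q c.toList)) 0 = 0 then []
  else cmds.filter (fun c =>
    decide (cmds.foldl (fun m c => max m (pvCpl q c.toList)) 0 ≤ pvCpl q c.toList))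

theorem altCore_congr {q₁ q₂ : List Char} {cmds : List String}
    (h : ∀ c ∈ cmds, pvCpl q₁ c.toList = pvCpl q₂ c.toList) :
    altCore q₁ cmds = altCore q₂ cmds := by
  unfold altCore
  have hb : List.foldl (fun m c => max m (pvCpl q₁ c.toList)) 0 cmds
      = List.foldl (fun m c => max m (pvCpl q₂ c.toList)) 0 cmds := foldl_max_congr h
  rw [hb]
  split
  · rfl
  · exact List.filter_congr (fun c hc => by rw [h c hc])

theorem clossest_match_eq_altCore (querry : String) (commands : List String) :
    clossest_match querry commands = altCore querry.toList commands := by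
  suffices H : ∀ (n : Nat) (q : String), q.toList.length ≤ n →
      clossest_match q commands = altCore q.toList commands by
    exact H querry.toList.length querry (Nat.le_refl _)
  intro n
  induction n with
  | zero =>
    intro q hq
    have hq0 : q.toList = [] := List.eq_nil_of_length_eq_zero (Nat.le_zero.1 hq)
    have hlen : PySem.Str.len q = 0 := by rw [PySem.Str.len_eq, hq0]; rfl
    rw [clossest_match, if_pos hlen, hq0]
    unfold altCore
    have hz : List.foldl (fun m c => max m (pvCpl [] c.toList)) 0 commands = 0 :=
      Nat.le_antisymm (foldl_max_le (Nat.le_refl 0) (fun c _ => by simp [pvCpl])) le_foldl_max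
    rw [if_pos hz]
  | succ n ih =>
    intro q hq
    by_cases hlen : PySem.Str.len q = 0
    · have hq0 : q.toList = [] := by
        have := PySem.Str.len_eq q
        rw [hlen] at this
        exact List.eq_nil_of_length_eq_zero (by exact_mod_cast this.symm)
      rw [clossest_match, if_pos hlen, hq0]
      unfold altCore
      have hz : List.foldl (fun m c => max m (pvCpl [] c.toList)) 0 commands = 0 :=
        Nat.le_antisymm (foldl_max_le (Nat.le_refl 0) (fun c _ => by simp [pvCpl])) le_foldl_max
      rw [if_pos hz]
    · have hne : 0 < q.toList.length := by
        have := PySem.Str.len_eq q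
        rcases Nat.eq_zero_or_pos q.toList.length with h | h
        · exfalso; apply hlen; rw [this, h]; rfl
        · exact h
      rw [clossest_match, if_neg hlen]
      show (if 0 < (commands.filter (fun x => PySem.Str.startswith x q)).length
            then commands.filter (fun x => PySem.Str.startswith x q)
            else clossest_match (PySem.Str.slice q none (some (-1))) commands)
          = altCore q.toList commands
      set L := q.toList with hL
      set best := commands.foldl (fun m c => max m (pvCpl L c.toList)) 0 with hbest
      by_cases hpos : 0 < (commands.filter (fun x => PySem.Str.startswith x q)).length
      · rw [if_pos hpos]
        obtain ⟨x, hx⟩ := List.exists_mem_of_ne_nil _ (List.ne_nil_of_length_pos hpos)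
        have hxmem : x ∈ commands := (List.mem_filter.1 hx).1
        have hxpre : L <+: x.toList := by
          have h := (List.mem_filter.1 hx).2
          rw [PySem.Str.startswith_eq] at h
          exact (PySem.Chars.startswith_iff _ _).1 h
        have hub : best ≤ L.length := foldl_max_le (Nat.zero_le _) (fun c _ => pvCpl_le_left _ _)
        have hlb : L.length ≤ best :=
          le_trans ((prefix_iff_cpl L x.toList).1 hxpre)
            (@mem_le_foldl_max (fun c => pvCpl L c.toList) 0 commands x hxmem)
        have hbe : best = L.length := Nat.le_antisymm hub hlb
        have hbne : ¬ best = 0 := by omega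
        unfold altCore
        rw [← hbest, if_neg hbne]
        refine List.filter_congr (fun c _ => ?_)
        rw [PySem.Str.startswith_eq]
        by_cases h : L <+: c.toList
        · have h1 := (PySem.Chars.startswith_iff c.toList L).2 h
          have h2 : best ≤ pvCpl L c.toList := hbe ▸ (prefix_iff_cpl L c.toList).1 h
          rw [h1, decide_eq_true h2]
        · have h1 : PySem.Chars.startswith c.toList L = false := by
            rw [Bool.eq_false_iff]
            intro hh; exact h ((PySem.Chars.startswith_iff _ _).1 hh)
          have h2 : ¬ best ≤ pvCpl L c.toList := by
            rw [hbe]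
            intro hh; exact h ((prefix_iff_cpl L c.toList).2 hh)
          rw [h1, decide_eq_false h2]
      · rw [if_neg hpos]
        have hall : ∀ c ∈ commands, pvCpl L c.toList < L.length := by
          intro c hc
          rcases Nat.lt_or_ge (pvCpl L c.toList) L.length with h | h
          · exact h
          · exfalso
            apply hpos
            have hpre := (prefix_iff_cpl L c.toList).2 h
            have hsw : PySem.Str.startswith c q = true := by
              rw [PySem.Str.startswith_eq]
              exact (PySem.Chars.startswith_iff _ _).2 hpre
            exact List.length_pos_of_mem (List.mem_filter.2 ⟨hc, hsw⟩)
        have hdl : (PySem.Str.slice q none (some (-1))).toList = L.dropLast :=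
          PySem.Str.slice_to_neg_one q
        have hdlen : (PySem.Str.slice q none (some (-1))).toList.length ≤ n := by
          rw [hdl, List.length_dropLast]; omega
        rw [ih _ hdlen, hdl, List.dropLast_eq_take]
        exact altCore_congr (fun c hc => by
          rw [pvCpl_take]
          have := hall c hc
          omega)

-- ===== VERDICT (by name: the statement is the Claim_ definition above) =====
theorem clossest_match_spec : Claim_equal_clossest_match := by
  intro querry commands _
  show clossest_match querry commands = clossest_match_alt querry commands
  rw [clossest_match_eq_altCore]
  rfl
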